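-- pv_equiv track=rewrite | github.com/cmoyates/corridorkey-mlx | src/corridorkey_mlx/inference/tiling.py | _compute_tile_coords
-- ===== SOURCE A (Python) =====
-- def _compute_tile_coords(
--     image_size: int,
--     tile_size: int,
--     overlap: int,
-- ) -> list[tuple[int, int]]:
--     """Compute (start, end) positions for tiles along one axis.
--
--     Tiles overlap by `overlap` pixels. Last tile is clamped to image boundary.
--     """
--     if overlap >= tile_size:
--         msg = f"overlap ({overlap}) must be less than tile_size ({tile_size})"
--         raise ValueError(msg)
--
--     if image_size <= tile_size:
--         return [(0, image_size)]
--
--     stride = tile_size - overlap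
--     coords: list[tuple[int, int]] = []
--     start = 0
--     while start < image_size:
--         end = min(start + tile_size, image_size)
--         # Ensure last tile is full-sized by shifting start back
--         if end - start < tile_size and start > 0:
--             start = max(0, end - tile_size)
--         coords.append((start, end))
--         if end == image_size:
--             break
--         start += stride
--     return coords
-- ===== SOURCE B (Python) =====
-- def _compute_tile_coords(
--     image_size: int,
--     tile_size: int,
--     overlap: int,
-- ) -> list[tuple[int, int]]:
--     """Compute (start, end) positions for tiles along one axis.
--
--     Closed-form: count the full-stride tiles up front, then append the final
--     tile clamped to the image boundary.
--     """
--     if overlap >= tile_size: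
--         msg = f"overlap ({overlap}) must be less than tile_size ({tile_size})"
--         raise ValueError(msg)
--
--     if image_size <= tile_size:
--         return [(0, image_size)]
--
--     stride = tile_size - overlap
--     n = (image_size - tile_size + stride - 1) // stride  # ceil((image_size - tile_size) / stride)
--     return [(i * stride, i * stride + tile_size) for i in range(n)] + [
--         (image_size - tile_size, image_size)
--     ]
-- ===== Notes on version B (the rewrite author's own statement) =====
-- stated objective: simpler
-- what changed: The incremental while-loop with in-loop clamp-shift and break is replaced by an up-front closed-form ceil count of full-stride tiles, a comprehension producing them, and the final clamped tile appended once.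
-- intended difference: When overlap is negative and the stride is so large that ceil((image_size-tile_size)/stride)*stride >= image_size (only reachable with overlap < 0), A's loop exits before ever reaching the boundary and silently omits the final clamped tile (e.g. A(4,2,-3)=[(0,2)]), while B returns it ([(0,2),(2,4)]), which is intended since the docstring promises the last tile is clamped to the image boundary so the tiles reach image_size. — e.g. on _compute_tile_coords(4, 2, -3): A returns [(0, 2)], B returns [(0, 2), (2, 4)]
import Mathlib
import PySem

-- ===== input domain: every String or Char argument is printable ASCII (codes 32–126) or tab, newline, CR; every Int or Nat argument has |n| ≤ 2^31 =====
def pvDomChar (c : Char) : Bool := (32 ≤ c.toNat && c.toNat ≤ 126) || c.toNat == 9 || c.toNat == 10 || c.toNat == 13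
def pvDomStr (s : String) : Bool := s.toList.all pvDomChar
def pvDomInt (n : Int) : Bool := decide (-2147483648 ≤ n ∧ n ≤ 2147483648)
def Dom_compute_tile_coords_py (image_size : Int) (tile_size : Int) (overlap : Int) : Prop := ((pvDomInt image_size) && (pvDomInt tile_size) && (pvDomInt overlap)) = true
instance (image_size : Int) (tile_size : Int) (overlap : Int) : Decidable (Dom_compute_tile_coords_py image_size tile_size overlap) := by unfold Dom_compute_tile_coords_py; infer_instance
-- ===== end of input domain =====

-- B replaces A's incremental while-loop (with clamp-shift and break) by a closed-form
-- ceil count of full-stride tiles plus the final clamped tile (objective: simpler).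

-- ===== PORT A =====
-- The while-loop of A, state (coords, start); fuel is only a totality guard: callers pass
-- image_size.toNat + 1, which exceeds the iteration count since start grows by stride ≥ 1
-- while start < image_size.
def tileLoopA (image_size tile_size stride : Int) (coords : List (Int × Int)) (start : Int) : Nat → List (Int × Int)
  | 0 => coords
  | fuel + 1 =>
    if start < image_size then
      let e := min (start + tile_size) image_size
      let s := if e - start < tile_size ∧ 0 < start then max 0 (e - tile_size) else start
      if e = image_size then coords ++ [(s, e)]
      else tileLoopA image_size tile_size stride (coords ++ [(s, e)]) (s + stride) fuel
    else coords

def compute_tile_coords_py (image_size : Int) (tile_size : Int) (overlap : Int) : List (Int × Int) :=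
  if tile_size ≤ overlap then []  -- Python raises ValueError here; excluded by Pre_
  else if image_size ≤ tile_size then [(0, image_size)]
  else tileLoopA image_size tile_size (tile_size - overlap) [] 0 (image_size.toNat + 1)

-- ===== PORT B =====
def compute_tile_coords_py_alt (image_size : Int) (tile_size : Int) (overlap : Int) : List (Int × Int) :=
  if tile_size ≤ overlap then []  -- Source B raises the same ValueError here; excluded by Pre_
  else if image_size ≤ tile_size then [(0, image_size)]
  else
    let stride := tile_size - overlap
    let n := PySem.Int.floordiv (image_size - tile_size + stride - 1) stride
    (PySem.List.pyRange 0 n 1).map (fun i => (i * stride, i * stride + tile_size))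
      ++ [(image_size - tile_size, image_size)]

-- ===== PRECONDITION & SPEC =====
-- Pre_ excludes exactly the inputs on which A raises ValueError (overlap >= tile_size).
def Pre_compute_tile_coords_py (image_size : Int) (tile_size : Int) (overlap : Int) : Prop :=
  overlap < tile_size
instance (image_size : Int) (tile_size : Int) (overlap : Int) : Decidable (Pre_compute_tile_coords_py image_size tile_size overlap) := by unfold Pre_compute_tile_coords_py; infer_instance
def pvWitness_compute_tile_coords_py : Int × Int × Int := (10, 3, 1)

-- When overlap is negative and the stride is so large that ceil((image_size-tile_size)/stride)*stride ≥ image_size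
-- (only reachable with overlap < 0), A's loop exits before reaching the boundary and silently omits the final
-- clamped tile, while B returns it — intended, since the docstring promises the last tile is clamped to the
-- image boundary so the tiles reach image_size.
def D_compute_tile_coords_py (image_size : Int) (tile_size : Int) (overlap : Int) : Prop :=
  overlap < tile_size ∧ tile_size < image_size ∧
    image_size ≤
      PySem.Int.floordiv (image_size - tile_size + (tile_size - overlap) - 1) (tile_size - overlap)
        * (tile_size - overlap)
instance (image_size : Int) (tile_size : Int) (overlap : Int) : Decidable (D_compute_tile_coords_py image_size tile_size overlap) := by unfold D_compute_tile_coords_py; infer_instance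

def Spec_compute_tile_coords_py (image_size : Int) (tile_size : Int) (overlap : Int) (out : List (Int × Int)) : Prop := ¬ D_compute_tile_coords_py image_size tile_size overlap → out = compute_tile_coords_py_alt image_size tile_size overlap
instance (image_size : Int) (tile_size : Int) (overlap : Int) (out : List (Int × Int)) : Decidable (Spec_compute_tile_coords_py image_size tile_size overlap out) := by unfold Spec_compute_tile_coords_py; infer_instance

def pvDiffWitness_compute_tile_coords_py : Int × Int × Int := (4, 2, -3)
def pvDiffWitnessOut_compute_tile_coords_py : (List (Int × Int)) × (List (Int × Int)) :=
  ([(0, 2)], [(0, 2), (2, 4)])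

-- ===== CLAIM (what is proved, stated in full; the proofs are below) =====
def Claim_unchanged_compute_tile_coords_py : Prop := ∀ (image_size : Int) (tile_size : Int) (overlap : Int), Dom_compute_tile_coords_py image_size tile_size overlap → Pre_compute_tile_coords_py image_size tile_size overlap → Spec_compute_tile_coords_py image_size tile_size overlap (compute_tile_coords_py image_size tile_size overlap)
def Claim_changed_compute_tile_coords_py : Prop := Dom_compute_tile_coords_py (pvDiffWitness_compute_tile_coords_py.1) (pvDiffWitness_compute_tile_coords_py.2.1) (pvDiffWitness_compute_tile_coords_py.2.2) ∧ Pre_compute_tile_coords_py (pvDiffWitness_compute_tile_coords_py.1) (pvDiffWitness_compute_tile_coords_py.2.1) (pvDiffWitness_compute_tile_coords_py.2.2) ∧ D_compute_tile_coords_py (pvDiffWitness_compute_tile_coords_py.1) (pvDiffWitness_compute_tile_coords_py.2.1) (pvDiffWitness_compute_tile_coords_py.2.2) ∧ compute_tile_coords_py (pvDiffWitness_compute_tile_coords_py.1) (pvDiffWitness_compute_tile_coords_py.2.1) (pvDiffWitness_compute_tile_coords_py.2.2) = pvDiffWitnessOut_compute_tile_coords_py.1 ∧ compute_tile_coords_py_alt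 (pvDiffWitness_compute_tile_coords_py.1) (pvDiffWitness_compute_tile_coords_py.2.1) (pvDiffWitness_compute_tile_coords_py.2.2) = pvDiffWitnessOut_compute_tile_coords_py.2 ∧ pvDiffWitnessOut_compute_tile_coords_py.1 ≠ pvDiffWitnessOut_compute_tile_coords_py.2

-- ===== LEMMAS AND PROOFS =====

theorem loopA_eq (im ts stride n : Int) (hs : 0 < stride)
    (h1 : n * stride ≤ im - ts + stride - 1) (h2 : im - ts + stride - 1 < (n + 1) * stride)
    (hts : ts < im) (hn : n * stride < im) :
    ∀ (k j fuel : Nat) (coords : List (Int × Int)), (j : Int) + k = n → k < fuel →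
      tileLoopA im ts stride coords ((j : Int) * stride) fuel
        = coords ++ (((PySem.List.pyRange (j : Int) n 1).map
            (fun i => (i * stride, i * stride + ts))) ++ [(im - ts, im)]) := by
  have hd1 : 1 ≤ im - ts := by omega
  have hdn : im - ts ≤ n * stride := by nlinarith
  intro k
  induction k with
  | zero =>
    intro j fuel coords hjk hkf
    have hj : (j : Int) = n := by omega
    obtain ⟨f, rfl⟩ : ∃ f, fuel = f + 1 := ⟨fuel - 1, by omega⟩
    rw [hj]
    have hpos : 0 < n * stride := by omega
    have hemin : min (n * stride + ts) im = im := by omega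
    simp only [tileLoopA, if_pos hn, hemin]
    simp only [if_true]
    have hrange : PySem.List.pyRange n n 1 = [] := by simp
    rw [hrange]
    by_cases hc : im - n * stride < ts ∧ 0 < n * stride
    · rw [if_pos hc]
      have : max 0 (im - ts) = im - ts := by omega
      rw [this]
      simp
    · rw [if_neg hc]
      have : n * stride = im - ts := by omega
      rw [this]
      simp
  | succ k ih =>
    intro j fuel coords hjk hkf
    obtain ⟨f, rfl⟩ : ∃ f, fuel = f + 1 := ⟨fuel - 1, by omega⟩
    have hjn : (j : Int) < n := by omega
    have hjlt : (j : Int) * stride ≤ (n - 1) * stride := by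
      apply mul_le_mul_of_nonneg_right (by omega) (by omega)
    have hlt : (j : Int) * stride + ts < im := by nlinarith
    have hstart : (j : Int) * stride < im := by omega
    have hemin : min ((j : Int) * stride + ts) im = (j : Int) * stride + ts := by omega
    have hne : ¬ ((j : Int) * stride + ts = im) := by omega
    simp only [tileLoopA, if_pos hstart, hemin]
    rw [if_neg (by omega : ¬ ((j : Int) * stride + ts - (j : Int) * stride < ts ∧ 0 < (j : Int) * stride))]
    rw [if_neg hne]
    have hstep : (j : Int) * stride + stride = ((j + 1 : Nat) : Int) * stride := by push_cast; ring
    rw [hstep, ih (j + 1) f _ (by push_cast; omega) (by omega)]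
    rw [PySem.List.pyRange_one_cons hjn]
    push_cast
    simp

-- ===== VERDICT (by name: the statement is the Claim_ definition above) =====
theorem compute_tile_coords_py_spec : Claim_unchanged_compute_tile_coords_py := by
  intro im ts ov hdom hpre
  unfold Spec_compute_tile_coords_py
  intro hnD
  unfold Pre_compute_tile_coords_py at hpre
  unfold compute_tile_coords_py compute_tile_coords_py_alt
  have hov : ¬ (ts ≤ ov) := by omega
  rw [if_neg hov, if_neg hov]
  by_cases him : im ≤ ts
  · rw [if_pos him, if_pos him]
  · rw [if_neg him, if_neg him]
    have hs : 0 < ts - ov := by omega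
    show tileLoopA im ts (ts - ov) [] 0 (im.toNat + 1)
      = (PySem.List.pyRange 0 (PySem.Int.floordiv (im - ts + (ts - ov) - 1) (ts - ov))).map
          (fun i => (i * (ts - ov), i * (ts - ov) + ts)) ++ [(im - ts, im)]
    obtain ⟨h1, h2⟩ := (PySem.Int.floordiv_eq_iff_of_pos hs).mp
      (rfl : PySem.Int.floordiv (im - ts + (ts - ov) - 1) (ts - ov)
        = PySem.Int.floordiv (im - ts + (ts - ov) - 1) (ts - ov))
    set n := PySem.Int.floordiv (im - ts + (ts - ov) - 1) (ts - ov) with hndef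
    have hnim : n * (ts - ov) < im := by
      unfold D_compute_tile_coords_py at hnD
      rw [← hndef] at hnD
      by_contra hle
      exact hnD ⟨hpre, by omega, by omega⟩
    have h0n : 0 ≤ n := by nlinarith
    have hnle : n ≤ n * (ts - ov) := le_mul_of_one_le_right h0n (by omega)
    have hfe := loopA_eq im ts (ts - ov) n hs h1 h2 (by omega) hnim
      n.toNat 0 (im.toNat + 1) [] (by push_cast; omega) (by omega)
    have h00 : ((0 : Nat) : Int) * (ts - ov) = 0 := by simp
    rw [h00] at hfe
    simp only [Nat.cast_zero, List.nil_append] at hfe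
    exact hfe

theorem compute_tile_coords_py_changed : Claim_changed_compute_tile_coords_py := by
  unfold Claim_changed_compute_tile_coords_py; decide
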